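-- pv_equiv track=rewrite | github.com/menard-noe/LeetCode | Maximum 69 Number.py | maximum69Number
-- ===== SOURCE A (Python) =====
-- def maximum69Number(num: int) -> int:
--     temp_res = []
--
--     while num != 0:
--         temp_res.append(num % 10)
--         num = num // 10
--
--     temp_res.reverse()
--     res = 0
--     modif = False
--     for val in temp_res:
--         if val == 6 and not modif:
--             res = res * 10 + 9
--             modif = True
--         else:
--             res = res * 10 + val
--
--     return res
-- ===== SOURCE B (Python) =====
-- def maximum69Number(num: int) -> int:
--     # One low-to-high digit pass: remember the place index of the most
--     # significant 6, then add 3 * 10**pos arithmetically (no list rebuild).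
--     pos = -1
--     p = 0
--     n = num
--     while n != 0:
--         if n % 10 == 6:
--             pos = p
--         n //= 10
--         p += 1
--     return num if pos < 0 else num + 3 * 10 ** pos
-- ===== Notes on version B (the rewrite author's own statement) =====
-- stated objective: alternative
-- what changed: Instead of extracting all digits, reversing the list and rebuilding the number with a flip flag, B makes one low-to-high digit pass recording the place index of the most significant 6 and returns num + 3*10**pos (or num if there is no 6).
import Mathlib
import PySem

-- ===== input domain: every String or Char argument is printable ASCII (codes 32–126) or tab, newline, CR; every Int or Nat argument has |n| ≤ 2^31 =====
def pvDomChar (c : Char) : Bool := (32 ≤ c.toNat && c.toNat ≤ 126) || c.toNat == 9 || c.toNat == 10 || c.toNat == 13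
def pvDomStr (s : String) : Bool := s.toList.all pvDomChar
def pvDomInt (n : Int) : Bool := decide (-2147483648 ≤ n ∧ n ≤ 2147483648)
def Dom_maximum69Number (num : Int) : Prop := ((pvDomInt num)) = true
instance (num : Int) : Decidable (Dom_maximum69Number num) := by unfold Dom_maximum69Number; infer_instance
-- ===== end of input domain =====

-- B is an alternative one-pass arithmetic implementation (place of the most significant 6, then num + 3*10^pos); equivalence is proved for 0 ≤ num (A's while loop never terminates on negative num).

-- ===== PORT A =====
-- the `while num != 0` digit-extraction loop, with a fuel counter (num.toNat suffices
-- for 0 < num) as a pure totality guard; for num < 0 Python's loop never terminates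
-- (num // 10 stays negative), so that case is outside Pre_ and we stop.
def pvDigitsRevAux : Nat → Int → List Int
  | 0, _ => []
  | fuel + 1, num =>
    if 0 < num then
      PySem.Int.mod num 10 :: pvDigitsRevAux fuel (PySem.Int.floordiv num 10)
    else []

-- the `for val in temp_res` rebuild loop over (res, modif)
def pvStepA (st : Int × Bool) (val : Int) : Int × Bool :=
  if val = 6 ∧ st.2 = false then (st.1 * 10 + 9, true) else (st.1 * 10 + val, st.2)

def maximum69Number (num : Int) : Int :=
  let temp_res := (pvDigitsRevAux num.toNat num).reverse
  (temp_res.foldl pvStepA (0, false)).1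

-- ===== PORT B =====
-- one low-to-high digit pass, state (pos, p), same fuel guard (n < 0 loops in Python: outside Pre_)
def pvScanPosAux : Nat → Int → Int → Int → Int
  | 0, _, _, pos => pos
  | fuel + 1, n, p, pos =>
    if 0 < n then
      pvScanPosAux fuel (PySem.Int.floordiv n 10) (p + 1)
        (if PySem.Int.mod n 10 = 6 then p else pos)
    else pos

def maximum69Number_alt (num : Int) : Int :=
  let pos := pvScanPosAux num.toNat num 0 (-1)
  if pos < 0 then num else num + 3 * 10 ^ pos.toNat

-- ===== PRECONDITION & SPEC =====
-- Pre_ excludes negative num, on which Python's A (and B) never terminates (num // 10 never reaches 0).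
def Pre_maximum69Number (num : Int) : Prop := 0 ≤ num
instance (num : Int) : Decidable (Pre_maximum69Number num) := by unfold Pre_maximum69Number; infer_instance
def pvWitness_maximum69Number : Int := 9669
def Spec_maximum69Number (num : Int) (out : Int) : Prop := out = maximum69Number_alt num
instance (num : Int) (out : Int) : Decidable (Spec_maximum69Number num out) := by unfold Spec_maximum69Number; infer_instance

-- ===== CLAIM (what is proved, stated in full; the proofs are below) =====
def Claim_equal_maximum69Number : Prop := ∀ (num : Int), Dom_maximum69Number num → Pre_maximum69Number num → Spec_maximum69Number num (maximum69Number num)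

-- ===== LEMMAS AND PROOFS =====

-- little-endian value of a digit list
def pvLittleVal : List Int → Int
  | [] => 0
  | d :: t => d + 10 * pvLittleVal t

-- index (= place value) of the LAST 6 in a little-endian digit list
def pvLastIdx6 : List Int → Option Nat
  | [] => none
  | d :: t =>
    match pvLastIdx6 t with
    | some i => some (i + 1)
    | none => if d = 6 then some 0 else none

theorem pvLittleVal_digitsRev (fuel : Nat) : ∀ (num : Int), 0 ≤ num → num.toNat ≤ fuel →
    pvLittleVal (pvDigitsRevAux fuel num) = num := by
  induction fuel with
  | zero => intro num h hf; simp only [pvDigitsRevAux, pvLittleVal]; omega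
  | succ fuel ih =>
    intro num h hf
    by_cases hp : 0 < num
    · rw [pvDigitsRevAux, if_pos hp, pvLittleVal]
      have h10 : PySem.Int.floordiv num 10 = num / 10 := PySem.Int.floordiv_eq_ediv_of_pos (by omega)
      have hm : PySem.Int.mod num 10 = num % 10 := PySem.Int.mod_eq_emod_of_pos (by omega)
      rw [h10, hm, ih (num / 10) (by omega) (by omega)]
      omega
    · rw [pvDigitsRevAux, if_neg hp, pvLittleVal]; omega

-- A's fold over the reversed digit list, characterised by pvLastIdx6
theorem pvFoldA_char (ds : List Int) :
    ds.reverse.foldl pvStepA (0, false) =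
      match pvLastIdx6 ds with
      | some i => (pvLittleVal ds + 3 * 10 ^ i, true)
      | none => (pvLittleVal ds, false) := by
  induction ds with
  | nil => simp [pvLastIdx6, pvLittleVal]
  | cons d t ih =>
    rw [List.reverse_cons, List.foldl_append, ih]
    cases hlt : pvLastIdx6 t with
    | some i =>
      simp only [pvLastIdx6, hlt, List.foldl, pvStepA, pvLittleVal]
      norm_num [pow_succ]; ring
    | none =>
      by_cases hd : d = 6
      · simp only [pvLastIdx6, hlt, List.foldl, pvStepA, pvLittleVal, hd]
        norm_num
        ring
      · simp only [pvLastIdx6, hlt, List.foldl, pvStepA, pvLittleVal, hd]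
        simp only [false_and, if_false]
        norm_num; ring

-- B's scan, characterised by pvLastIdx6 of the digit list (same fuel on both sides)
theorem pvScanPos_char (fuel : Nat) : ∀ (n p pos : Int), 0 ≤ n → n.toNat ≤ fuel →
    pvScanPosAux fuel n p pos =
      match pvLastIdx6 (pvDigitsRevAux fuel n) with
      | some i => p + (i : Int)
      | none => pos := by
  induction fuel with
  | zero => intro n p pos h hf; simp [pvScanPosAux, pvDigitsRevAux, pvLastIdx6]
  | succ fuel ih =>
    intro n p pos h hf
    by_cases hp : 0 < n
    · rw [pvScanPosAux, if_pos hp, pvDigitsRevAux, if_pos hp]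
      have h10 : PySem.Int.floordiv n 10 = n / 10 := PySem.Int.floordiv_eq_ediv_of_pos (by omega)
      have hm' : PySem.Int.mod n 10 = n % 10 := PySem.Int.mod_eq_emod_of_pos (by omega)
      rw [ih (PySem.Int.floordiv n 10) (p + 1) (if PySem.Int.mod n 10 = 6 then p else pos)
        (by rw [h10]; omega) (by rw [h10]; omega)]
      rw [h10, hm']
      cases hlt : pvLastIdx6 (pvDigitsRevAux fuel (n / 10)) with
      | some i => simp only [pvLastIdx6, hlt]; push_cast; ring
      | none =>
        by_cases hm : n % 10 = 6
        · simp [pvLastIdx6, hlt, hm]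
        · simp [pvLastIdx6, hlt, hm]
    · rw [pvScanPosAux, if_neg hp, pvDigitsRevAux, if_neg hp]
      simp [pvLastIdx6]

-- ===== VERDICT (by name: the statement is the Claim_ definition above) =====
theorem maximum69Number_spec : Claim_equal_maximum69Number := by
  intro num _ hpre
  unfold Spec_maximum69Number maximum69Number maximum69Number_alt
  have hA := pvFoldA_char (pvDigitsRevAux num.toNat num)
  have hB := pvScanPos_char num.toNat num 0 (-1) hpre (le_refl _)
  have hL := pvLittleVal_digitsRev num.toNat num hpre (le_refl _)
  cases hlt : pvLastIdx6 (pvDigitsRevAux num.toNat num) with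
  | some i =>
    simp only [hlt] at hA hB
    simp only [hA, hB, hL]
    rw [if_neg (by simp)]
    simp
  | none =>
    simp only [hlt] at hA hB
    simp only [hA, hB, hL]
    norm_num
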